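-- pv_equiv track=rewrite | github.com/Devprasanna1905/Data-structures-and-algorithms-in-python- | compare string and list using recursion.py | check
-- ===== SOURCE A (Python) =====
-- def check(p,l,out=None):
--     if out is None:
--         out=[]
--
--     for i in l:
--         if p.startswith(i):
--             out.append(i)
--             return check(p[len(i):],l,out)
--     return out
-- ===== SOURCE B (Python) =====
-- def check(p, l, out=None):
--     if out is None:
--         out = []
--     pos = 0
--     while True:
--         for i in l:
--             if p.startswith(i, pos):
--                 out.append(i)
--                 pos += len(i)
--                 break
--         else:
--             return out
-- ===== Notes on version B (the rewrite author's own statement) =====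
-- stated objective: alternative
-- what changed: Replaces A's tail recursion that slices off the matched prefix (p[len(i):]) at every step with an iterative while-loop over a position index into the unchanged string, testing p.startswith(i, pos); no string copies and no recursion, same first-in-list greedy tie-break.
-- outside the precondition, e.g. on check('a', [''], None): A raises RecursionError, B does not finish within the time limit
import Mathlib
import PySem

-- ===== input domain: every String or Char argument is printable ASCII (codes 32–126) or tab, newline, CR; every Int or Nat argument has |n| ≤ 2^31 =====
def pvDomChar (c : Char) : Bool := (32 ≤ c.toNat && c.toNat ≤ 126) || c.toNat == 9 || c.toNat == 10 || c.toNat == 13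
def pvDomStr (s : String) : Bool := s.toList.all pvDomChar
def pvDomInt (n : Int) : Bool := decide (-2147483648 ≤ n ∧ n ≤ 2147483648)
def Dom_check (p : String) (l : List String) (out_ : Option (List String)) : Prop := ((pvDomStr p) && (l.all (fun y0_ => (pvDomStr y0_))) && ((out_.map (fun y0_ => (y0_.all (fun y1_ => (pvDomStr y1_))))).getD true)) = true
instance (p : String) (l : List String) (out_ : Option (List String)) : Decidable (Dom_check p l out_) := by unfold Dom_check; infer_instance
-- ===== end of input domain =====

-- B replaces A's recursion-with-slicing by an iterative scan that keeps a position
-- index into the unchanged string (no copies, no recursion); same first-match greedy rule.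
-- Both A and B mutate a caller-supplied `out` list in place; the equivalence proved here
-- is about the return value.

-- ===== PORT A =====
-- fuel makes the recursion total; with "" ∉ l (Pre_) every recursive step consumes
-- at least one character, so fuel p.length+1 is never exhausted on admitted inputs.
mutual
def checkGo (fuel : Nat) (p : List Char) (l : List String) (out : List String) : List String :=
  match fuel with
  | 0 => out
  | fuel + 1 => checkFor fuel p l l out
  termination_by (fuel, 0)
def checkFor (fuel : Nat) (p : List Char) (l : List String) (rest : List String) (out : List String) : List String :=
  match rest with
  | [] => out
  | i :: js =>
      if PySem.Chars.startswith p i.toList then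
        checkGo fuel (PySem.Chars.slice p (some (i.length : Int)) none) l (out ++ [i])
      else
        checkFor fuel p l js out
  termination_by (fuel, rest.length + 1)
end

def check (p : String) (l : List String) (out_ : Option (List String)) : List String :=
  checkGo (p.length + 1) p.toList l (match out_ with | none => [] | some o => o)

-- ===== PORT B =====
-- p.startswith(i, pos) is ported by hand as i.toList.isPrefixOf (cs.drop pos): exact,
-- since 0 ≤ pos and Python's startswith with a start offset tests a prefix of p[pos:].
def checkIter (cs : List Char) (l : List String) : Nat → Nat → List String → List String
  | 0, _, out => out
  | fuel + 1, pos, out =>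
      match l.find? (fun i => i.toList.isPrefixOf (cs.drop pos)) with
      | none => out
      | some i => checkIter cs l fuel (pos + i.length) (out ++ [i])

def check_alt (p : String) (l : List String) (out_ : Option (List String)) : List String :=
  checkIter p.toList l (p.length + 1) 0 (out_.getD [])

-- ===== PRECONDITION & SPEC =====
-- Pre_ excludes lists containing the empty string: the empty string matches as a prefix
-- forever, so Python A always ends in RecursionError and Python B loops forever there.
def Pre_check (p : String) (l : List String) (out_ : Option (List String)) : Prop := "" ∉ l
instance (p : String) (l : List String) (out_ : Option (List String)) : Decidable (Pre_check p l out_) := by unfold Pre_check; infer_instance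
def pvWitness_check : String × List String × Option (List String) := ("abab", ["ab", "b"], none)
def Spec_check (p : String) (l : List String) (out_ : Option (List String)) (out : List String) : Prop := out = check_alt p l out_
instance (p : String) (l : List String) (out_ : Option (List String)) (out : List String) : Decidable (Spec_check p l out_ out) := by unfold Spec_check; infer_instance

-- ===== CLAIM (what is proved, stated in full; the proofs are below) =====
def Claim_equal_check : Prop := ∀ (p : String) (l : List String) (out_ : Option (List String)), Dom_check p l out_ → Pre_check p l out_ → Spec_check p l out_ (check p l out_)

-- ===== LEMMAS AND PROOFS =====

lemma sw_eq (p q : List Char) : PySem.Chars.startswith p q = q.isPrefixOf p := by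
  rw [Bool.eq_iff_iff]
  simp [PySem.Chars.startswith_iff]

lemma for_find (fuel : Nat) (p : List Char) (l rest : List String) (out : List String) :
    checkFor fuel p l rest out =
      match rest.find? (fun i => i.toList.isPrefixOf p) with
      | none => out
      | some i => checkGo fuel (PySem.Chars.slice p (some (i.length : Int)) none) l (out ++ [i]) := by
  induction rest with
  | nil => simp [checkFor]
  | cons i js ih =>
      rw [checkFor]
      by_cases h : i.toList.isPrefixOf p
      · simp [sw_eq, h, List.find?]
      · simp [sw_eq, h, List.find?, ih]

lemma main_eq (fuel : Nat) (cs : List Char) (l : List String) (pos : Nat) (out : List String) :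
    checkGo fuel (cs.drop pos) l out = checkIter cs l fuel pos out := by
  induction fuel generalizing pos out with
  | zero => simp [checkGo, checkIter]
  | succ fuel ih =>
      rw [checkGo, checkIter, for_find]
      cases hf : l.find? (fun i => i.toList.isPrefixOf (cs.drop pos)) with
      | none => rfl
      | some i =>
          have hslice : PySem.Chars.slice (cs.drop pos) (some (i.length : Int)) none
              = cs.drop (pos + i.length) := by
            rw [PySem.Chars.slice_eq_listSlice, PySem.List.slice_from_natCast,
              List.drop_drop]
          simp only [hslice]
          exact ih (pos + i.length) (out ++ [i])

-- ===== VERDICT (by name: the statement is the Claim_ definition above) =====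
theorem check_spec : Claim_equal_check := by
  intro p l out_ _ _
  unfold Spec_check check check_alt
  cases out_ <;> simpa using main_eq (p.length + 1) p.toList l 0 _
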